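-- pv_equiv track=rewrite | github.com/Dragosp33/FMI---Materiale-si-proiecte | IA/KR/lab6_ex7/main.py | estimate_score
-- ===== SOURCE A (Python) =====
-- def estimate_score(board, k, player):
--     n = len(board)
--     score = 0
--
--     # Check rows
--     for row in range(n):
--         count = 0
--         empty = 0
--         for col in range(n):
--             if board[row][col] == player:
--                 count += 1
--             elif board[row][col] == '#':
--                 empty += 1
--             else:
--                 count = 0
--                 empty = 0
--
--             if count + empty == k:
--                 score += 10 ** count
--                 if empty == 1:
--                     score += 1
--
--     # Check columns
--     for col in range(n):
--         count = 0
--         empty = 0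
--         for row in range(n):
--             if board[row][col] == player:
--                 count += 1
--             elif board[row][col] == '#':
--                 empty += 1
--             else:
--                 count = 0
--                 empty = 0
--
--             if count + empty == k:
--                 score += 10 ** count
--                 if empty == 1:
--                     score += 1
--
--     # Check diagonals
--     for i in range(n - k + 1):
--         for j in range(n - k + 1):
--             count = 0
--             empty = 0
--             for x in range(k):
--                 if board[i + x][j + x] == player:
--                     count += 1
--                 elif board[i + x][j + x] == '#':
--                     empty += 1
--                 else:
--                     count = 0
--                     empty = 0
--
--                 if count + empty == k:
--                     score += 10 ** count
--                     if empty == 1: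
--                         score += 1
--
--             count = 0
--             empty = 0
--             for x in range(k):
--                 if board[i + x][j + k - 1 - x] == player:
--                     count += 1
--                 elif board[i + x][j + k - 1 - x] == '#':
--                     empty += 1
--                 else:
--                     count = 0
--                     empty = 0
--
--                 if count + empty == k:
--                     score += 10 ** count
--                     if empty == 1:
--                         score += 1
--
--     return score
-- ===== SOURCE B (Python) =====
-- def estimate_score(board, k, player):
--     n = len(board)
--     if k > n:
--         return 0  # no k-window fits on an n x n board
--
--     def line_score(cells):
--         # decompose the line into maximal opponent-free runs; a run of length >= k
--         # scores once, from its first k cells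
--         s = 0
--         i = 0
--         m = len(cells)
--         while i < m:
--             if cells[i] != player and cells[i] != '#':
--                 i += 1
--                 continue
--             j = i
--             while j < m and (cells[j] == player or cells[j] == '#'):
--                 j += 1
--             if j - i >= k:
--                 c = cells[i:i + k].count(player)
--                 s += 10 ** c
--                 if k - c == 1:
--                     s += 1
--             i = j
--         return s
--
--     def diag_scores(grid):
--         # prefix sums of player / opponent counts along south-east diagonals,
--         # so every k-window on a diagonal is scored in O(1)
--         P = [[0] * (n + 1)]
--         O = [[0] * (n + 1)]
--         for i in range(n):
--             row = grid[i]
--             Pp, Op = P[i], O[i]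
--             Pr, Or = [0], [0]
--             for j in range(n):
--                 v = row[j]
--                 Pr.append(Pp[j] + (1 if v == player else 0))
--                 Or.append(Op[j] + (1 if v != player and v != '#' else 0))
--             P.append(Pr)
--             O.append(Or)
--         s = 0
--         m = n - k + 1
--         for i in range(m):
--             Pt, Ot, Pb, Ob = P[i], O[i], P[i + k], O[i + k]
--             for j in range(m):
--                 if Ob[j + k] == Ot[j]:
--                     c = Pb[j + k] - Pt[j]
--                     s += 10 ** c
--                     if k - c == 1:
--                         s += 1
--         return s
--
--     grid = [[board[i][j] for j in range(n)] for i in range(n)]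
--     flipped = [[board[i][n - 1 - j] for j in range(n)] for i in range(n)]
--     score = 0
--     for r in range(n):
--         score += line_score(grid[r])
--     for c in range(n):
--         score += line_score([grid[r][c] for r in range(n)])
--     score += diag_scores(grid)
--     score += diag_scores(flipped)
--     return score
-- ===== Notes on version B (the rewrite author's own statement) =====
-- stated objective: faster
-- what changed: replaces A's per-cell streak state machine with a maximal-run decomposition for rows/columns and O(1) window tests against precomputed diagonal prefix-sum tables (anti-diagonals via the horizontally flipped board), and returns 0 immediately when k exceeds the board size since no k-window fits
-- outside the precondition, e.g. on estimate_score([['o']], 0, 'x'): A returns 2, B returns 8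
import Mathlib
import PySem

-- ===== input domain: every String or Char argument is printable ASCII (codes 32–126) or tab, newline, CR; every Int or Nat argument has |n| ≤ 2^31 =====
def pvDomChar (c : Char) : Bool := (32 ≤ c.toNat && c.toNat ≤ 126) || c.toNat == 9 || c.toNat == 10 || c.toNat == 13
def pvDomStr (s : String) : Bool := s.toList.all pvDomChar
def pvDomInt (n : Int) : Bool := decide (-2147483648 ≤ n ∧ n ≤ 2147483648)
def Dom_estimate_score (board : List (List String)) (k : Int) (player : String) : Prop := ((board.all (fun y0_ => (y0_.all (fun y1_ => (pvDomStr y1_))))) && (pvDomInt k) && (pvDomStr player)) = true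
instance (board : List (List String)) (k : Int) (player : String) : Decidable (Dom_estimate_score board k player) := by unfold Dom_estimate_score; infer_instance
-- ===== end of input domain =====

-- B replaces A's per-cell streak state machine by a run decomposition for rows/columns and
-- prefix-sum tables along the diagonals (O(n^2) instead of O(n^2*k)); return values proved equal on Pre_.

-- ===== PORT A =====

-- board[r][c]; indices are in range on every Pre_-admitted access
def pvCell (board : List (List String)) (r c : Nat) : String :=
  (board.getD r []).getD c ""

-- the loop body shared by all of A's scans: update (count, empty), then maybe score
def pvAStep (player : String) (k : Int) (st : Nat × Nat × Int) (v : String) : Nat × Nat × Int :=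
  let ce : Nat × Nat :=
    if v == player then (st.1 + 1, st.2.1)
    else if v == "#" then (st.1, st.2.1 + 1)
    else (0, 0)
  (ce.1, ce.2,
    if ((ce.1 : Int) + (ce.2 : Int) = k) then
      st.2.2 + 10 ^ ce.1 + (if ce.2 = 1 then (1 : Int) else 0)
    else st.2.2)

def estimate_score (board : List (List String)) (k : Int) (player : String) : Int :=
  let n := board.length
  let score : Int := 0
  -- rows
  let score := (List.range n).foldl (fun s r =>
      ((List.range n).foldl (fun st c => pvAStep player k st (pvCell board r c)) (0, 0, s)).2.2) score
  -- columns
  let score := (List.range n).foldl (fun s c =>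
      ((List.range n).foldl (fun st r => pvAStep player k st (pvCell board r c)) (0, 0, s)).2.2) score
  -- diagonals
  let m := ((n : Int) - k + 1).toNat
  (List.range m).foldl (fun s i =>
    (List.range m).foldl (fun s j =>
      let s := ((List.range k.toNat).foldl
        (fun st x => pvAStep player k st (pvCell board (i + x) (j + x))) (0, 0, s)).2.2
      ((List.range k.toNat).foldl
        (fun st x => pvAStep player k st (pvCell board (i + x) (((j : Int) + k - 1 - x).toNat))) (0, 0, s)).2.2) s) score

-- ===== PORT B =====

def pvRunCell (player v : String) : Bool := v == player || v == "#"

def pvIsP (player v : String) : Bool := v == player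

def pvIsO (player v : String) : Bool := !(v == player) && !(v == "#")

-- one k-window of a maximal opponent-free run scores from its first k cells
def pvLineScore (player : String) (k : Int) : List String → Int
  | [] => 0
  | v :: rest =>
    if pvRunCell player v then
      (if k ≤ ((List.takeWhile (pvRunCell player) (v :: rest)).length : Int) then
        10 ^ (((List.takeWhile (pvRunCell player) (v :: rest)).take k.toNat).count player)
          + (if k - (((List.takeWhile (pvRunCell player) (v :: rest)).take k.toNat).count player : Int) = 1
              then (1 : Int) else 0)
      else 0) + pvLineScore player k (List.dropWhile (pvRunCell player) (v :: rest))
    else pvLineScore player k rest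
termination_by l => l.length
decreasing_by
  · have h := List.length_dropWhile_le (pvRunCell player) rest
    rw [List.dropWhile_cons, if_pos ‹pvRunCell player v = true›]
    simp only [List.length_cons]
    omega
  · simp only [List.length_cons]; omega

-- prefix-sum row i+1 from row i ('Pr.append(Pp[j] + ...)')
def pvPStep (pind : String → Bool) (n : Nat) (row : List String) (prev : List Int) : List Int :=
  0 :: (List.range n).map (fun j => prev.getD j 0 + (if pind (row.getD j "") then 1 else 0))

-- the table P (resp. O) of Source B, row by row
def pvPRows (pind : String → Bool) (n : Nat) (grid : List (List String)) : Nat → List Int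
  | 0 => List.replicate (n + 1) (0 : Int)
  | i + 1 => pvPStep pind n (grid.getD i []) (pvPRows pind n grid i)

-- '10 ** c' is ported as 10 ^ c.toNat: exact whenever 0 ≤ c, which holds on Pre_ (c is a count difference over k in-board cells)
def pvDiagScores (player : String) (k : Int) (n : Nat) (grid : List (List String)) : Int :=
  let P := pvPRows (pvIsP player) n grid
  let O := pvPRows (pvIsO player) n grid
  let m := ((n : Int) - k + 1).toNat
  (List.range m).foldl (fun s i =>
    (List.range m).foldl (fun s j =>
      if (O (i + k.toNat)).getD (j + k.toNat) 0 = (O i).getD j 0 then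
        let c := (P (i + k.toNat)).getD (j + k.toNat) 0 - (P i).getD j 0
        s + 10 ^ c.toNat + (if k - c = 1 then (1 : Int) else 0)
      else s) s) 0

def estimate_score_alt (board : List (List String)) (k : Int) (player : String) : Int :=
  let n := board.length
  if (n : Int) < k then 0  -- 'if k > n: return 0' — no k-window fits on an n x n board
  else
  let grid := (List.range n).map (fun i => (List.range n).map (fun j => pvCell board i j))
  let flipped := (List.range n).map (fun i => (List.range n).map (fun j => pvCell board i (n - 1 - j)))
  let score : Int := 0
  let score := (List.range n).foldl (fun s r => s + pvLineScore player k (grid.getD r [])) score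
  let score := (List.range n).foldl (fun s c =>
      s + pvLineScore player k ((List.range n).map (fun r => (grid.getD r []).getD c ""))) score
  score + pvDiagScores player k board.length grid + pvDiagScores player k board.length flipped

-- ===== PRECONDITION & SPEC =====

-- Pre_ requires 1 ≤ k (a window length: nonpositive k is outside the task's natural domain)
-- and every row to be at least len(board) cells long (A raises IndexError on shorter rows).
def Pre_estimate_score (board : List (List String)) (k : Int) (player : String) : Prop :=
  1 ≤ k ∧ ∀ row ∈ board, board.length ≤ row.length

instance (board : List (List String)) (k : Int) (player : String) : Decidable (Pre_estimate_score board k player) := by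
  unfold Pre_estimate_score; infer_instance

def pvWitness_estimate_score : List (List String) × Int × String := ([["x", "#"], ["o", "x"]], 2, "x")

def Spec_estimate_score (board : List (List String)) (k : Int) (player : String) (out : Int) : Prop := out = estimate_score_alt board k player
instance (board : List (List String)) (k : Int) (player : String) (out : Int) : Decidable (Spec_estimate_score board k player out) := by unfold Spec_estimate_score; infer_instance

-- ===== CLAIM (what is proved, stated in full; the proofs are below) =====
def Claim_equal_estimate_score : Prop := ∀ (board : List (List String)) (k : Int) (player : String), Dom_estimate_score board k player → Pre_estimate_score board k player → Spec_estimate_score board k player (estimate_score board k player)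

-- ===== LEMMAS AND PROOFS =====

-- '#' cells that are not the player's mark
def pvIsH (player v : String) : Bool := !(v == player) && (v == "#")

-- score of one k-window that is rescanned from a fresh state
def pvWinVal (player : String) (k : Int) (l : List String) : Int :=
  if l.countP (pvIsO player) = 0 then
    10 ^ (l.countP (pvIsP player)) + (if k - (l.countP (pvIsP player) : Int) = 1 then (1 : Int) else 0)
  else 0

-- mathematical value of the prefix tables
def pvEmath (pind : String → Bool) (grid : List (List String)) : Nat → Nat → Int
  | 0, _ => 0
  | _ + 1, 0 => 0
  | i + 1, j + 1 => pvEmath pind grid i j + (if pind ((grid.getD i []).getD j "") then 1 else 0)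

theorem pv_stepO (player : String) (k : Int) (hk : 1 ≤ k) (st : Nat × Nat × Int) (v : String)
    (hv : pvIsO player v = true) : pvAStep player k st v = (0, 0, st.2.2) := by
  simp only [pvIsO, Bool.and_eq_true, Bool.not_eq_true'] at hv
  simp only [pvAStep, hv.1, hv.2, Bool.false_eq_true, if_false]
  have h0 : ¬((0 : Int) = k) := by omega
  simp [h0]

theorem pv_stepP (player : String) (k : Int) (c e : Nat) (s : Int) (v : String)
    (hp : (v == player) = true) :
    pvAStep player k (c, e, s) v
      = (c + 1, e, if (((c + 1 : Nat) : Int) + (e : Int) = k) then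
          s + 10 ^ (c + 1) + (if e = 1 then (1 : Int) else 0) else s) := by
  simp [pvAStep, hp]

theorem pv_stepH (player : String) (k : Int) (c e : Nat) (s : Int) (v : String)
    (hp : (v == player) = false) (hh : (v == "#") = true) :
    pvAStep player k (c, e, s) v
      = (c, e + 1, if ((c : Int) + ((e + 1 : Nat) : Int) = k) then
          s + 10 ^ c + (if e + 1 = 1 then (1 : Int) else 0) else s) := by
  simp [pvAStep, hp, hh]

theorem pv_runCases (player v : String) (h : pvRunCell player v = true) :
    (v == player) = true ∨ ((v == player) = false ∧ (v == "#") = true) := by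
  simp only [pvRunCell, Bool.or_eq_true] at h
  rcases h with h | h
  · exact Or.inl h
  · by_cases hp : (v == player) = true
    · exact Or.inl hp
    · exact Or.inr ⟨by simpa using hp, h⟩

theorem pv_notRun_isO (player v : String) (h : pvRunCell player v = false) :
    pvIsO player v = true := by
  simp only [pvRunCell, Bool.or_eq_false_iff] at h
  simp [pvIsO, h.1, h.2]

theorem pv_noFire (player : String) (k : Int) :
    ∀ (l : List String) (c e : Nat) (s : Int), (c : Int) + e + l.length < k →
      (l.foldl (pvAStep player k) (c, e, s)).2.2 = s := by
  intro l
  induction l with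
  | nil => intro c e s h; simp
  | cons v t ih =>
    intro c e s h
    simp only [List.length_cons] at h
    have hk : 1 ≤ k := by push_cast at h; omega
    simp only [List.foldl_cons]
    by_cases hrun : pvRunCell player v = true
    · rcases pv_runCases player v hrun with hp | ⟨hp, hh⟩
      · rw [pv_stepP player k c e s v hp,
          if_neg (by push_cast; push_cast at h; omega)]
        exact ih (c + 1) e s (by push_cast; push_cast at h; omega)
      · rw [pv_stepH player k c e s v hp hh,
          if_neg (by push_cast; push_cast at h; omega)]
        exact ih c (e + 1) s (by push_cast; push_cast at h; omega)
    · rw [pv_stepO player k hk _ v (pv_notRun_isO player v (by simpa using hrun))]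
      exact ih 0 0 s (by push_cast; push_cast at h; omega)

theorem pv_cleanLt (player : String) (k : Int) :
    ∀ (l : List String) (c e : Nat) (s : Int), (∀ v ∈ l, pvRunCell player v = true) →
      (c : Int) + e + l.length < k →
      l.foldl (pvAStep player k) (c, e, s)
        = (c + l.countP (pvIsP player), e + l.countP (pvIsH player), s) := by
  intro l
  induction l with
  | nil => intro c e s _ _; simp
  | cons v t ih =>
    intro c e s hcl h
    simp only [List.length_cons] at h
    simp only [List.foldl_cons]
    rcases pv_runCases player v (hcl v (List.mem_cons_self)) with hp | ⟨hp, hh⟩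
    · rw [pv_stepP player k c e s v hp, if_neg (by push_cast; push_cast at h; omega),
        ih (c + 1) e s (fun w hw => hcl w (List.mem_cons_of_mem v hw))
          (by push_cast; push_cast at h; omega)]
      have h1 : (v :: t).countP (pvIsP player) = t.countP (pvIsP player) + 1 := by
        simp [List.countP_cons, pvIsP, hp]
      have h2 : (v :: t).countP (pvIsH player) = t.countP (pvIsH player) := by
        simp [List.countP_cons, pvIsH, hp]
      rw [h1, h2, show c + (t.countP (pvIsP player) + 1) = c + 1 + t.countP (pvIsP player) by omega]
    · rw [pv_stepH player k c e s v hp hh, if_neg (by push_cast; push_cast at h; omega),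
        ih c (e + 1) s (fun w hw => hcl w (List.mem_cons_of_mem v hw))
          (by push_cast; push_cast at h; omega)]
      have h1 : (v :: t).countP (pvIsP player) = t.countP (pvIsP player) := by
        simp [List.countP_cons, pvIsP, hp]
      have h2 : (v :: t).countP (pvIsH player) = t.countP (pvIsH player) + 1 := by
        simp [List.countP_cons, pvIsH, hp, hh]
      rw [h1, h2, show e + (t.countP (pvIsH player) + 1) = e + 1 + t.countP (pvIsH player) by omega]

theorem pv_cleanGe (player : String) (k : Int) :
    ∀ (l : List String) (c e : Nat) (s : Int), (∀ v ∈ l, pvRunCell player v = true) →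
      k ≤ (c : Int) + e →
      l.foldl (pvAStep player k) (c, e, s)
        = (c + l.countP (pvIsP player), e + l.countP (pvIsH player), s) := by
  intro l
  induction l with
  | nil => intro c e s _ _; simp
  | cons v t ih =>
    intro c e s hcl h
    simp only [List.foldl_cons]
    rcases pv_runCases player v (hcl v (List.mem_cons_self)) with hp | ⟨hp, hh⟩
    · rw [pv_stepP player k c e s v hp, if_neg (by push_cast; push_cast at h; omega),
        ih (c + 1) e s (fun w hw => hcl w (List.mem_cons_of_mem v hw))
          (by push_cast; push_cast at h; omega)]
      have h1 : (v :: t).countP (pvIsP player) = t.countP (pvIsP player) + 1 := by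
        simp [List.countP_cons, pvIsP, hp]
      have h2 : (v :: t).countP (pvIsH player) = t.countP (pvIsH player) := by
        simp [List.countP_cons, pvIsH, hp]
      rw [h1, h2, show c + (t.countP (pvIsP player) + 1) = c + 1 + t.countP (pvIsP player) by omega]
    · rw [pv_stepH player k c e s v hp hh, if_neg (by push_cast; push_cast at h; omega),
        ih c (e + 1) s (fun w hw => hcl w (List.mem_cons_of_mem v hw))
          (by push_cast; push_cast at h; omega)]
      have h1 : (v :: t).countP (pvIsP player) = t.countP (pvIsP player) := by
        simp [List.countP_cons, pvIsP, hp]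
      have h2 : (v :: t).countP (pvIsH player) = t.countP (pvIsH player) + 1 := by
        simp [List.countP_cons, pvIsH, hp, hh]
      rw [h1, h2, show e + (t.countP (pvIsH player) + 1) = e + 1 + t.countP (pvIsH player) by omega]

theorem pv_cleanExact (player : String) (k : Int) :
    ∀ (l : List String) (c e : Nat) (s : Int), (∀ v ∈ l, pvRunCell player v = true) →
      l ≠ [] → (c : Int) + e + l.length = k →
      l.foldl (pvAStep player k) (c, e, s)
        = (c + l.countP (pvIsP player), e + l.countP (pvIsH player),
           s + 10 ^ (c + l.countP (pvIsP player))
             + (if e + l.countP (pvIsH player) = 1 then (1 : Int) else 0)) := by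
  intro l
  induction l with
  | nil => intro c e s _ hne _; exact absurd rfl hne
  | cons v t ih =>
    intro c e s hcl _ h
    simp only [List.length_cons] at h
    simp only [List.foldl_cons]
    rcases pv_runCases player v (hcl v (List.mem_cons_self)) with hp | ⟨hp, hh⟩
    · rw [pv_stepP player k c e s v hp]
      have h1 : (v :: t).countP (pvIsP player) = t.countP (pvIsP player) + 1 := by
        simp [pvIsP, hp]
      have h2 : (v :: t).countP (pvIsH player) = t.countP (pvIsH player) := by
        simp [pvIsH, hp]
      rcases List.eq_nil_or_concat' t with rfl | _
      · -- t = []: this step fires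
        rw [if_pos (by push_cast; push_cast at h; simp at h ⊢; omega)]
        simp [h1, h2]
      · have htne : t ≠ [] := by rename_i ht; rcases ht with ⟨_, _, rfl⟩; simp
        have hlen : 1 ≤ t.length := by
          cases t with | nil => exact absurd rfl htne | cons _ _ => simp
        rw [if_neg (by push_cast; push_cast at h; omega)]
        rw [ih (c + 1) e _ (fun w hw => hcl w (List.mem_cons_of_mem v hw)) htne
          (by push_cast; push_cast at h; omega)]
        rw [h1, h2, show c + (t.countP (pvIsP player) + 1) = c + 1 + t.countP (pvIsP player) by omega]
    · rw [pv_stepH player k c e s v hp hh]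
      have h1 : (v :: t).countP (pvIsP player) = t.countP (pvIsP player) := by
        simp [pvIsP, hp]
      have h2 : (v :: t).countP (pvIsH player) = t.countP (pvIsH player) + 1 := by
        simp [pvIsH, hp, hh]
      rcases List.eq_nil_or_concat' t with rfl | _
      · rw [if_pos (by push_cast; push_cast at h; simp at h ⊢; omega)]
        simp [h1, h2]
      · have htne : t ≠ [] := by rename_i ht; rcases ht with ⟨_, _, rfl⟩; simp
        have hlen : 1 ≤ t.length := by
          cases t with | nil => exact absurd rfl htne | cons _ _ => simp
        rw [if_neg (by push_cast; push_cast at h; omega)]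
        rw [ih c (e + 1) _ (fun w hw => hcl w (List.mem_cons_of_mem v hw)) htne
          (by push_cast; push_cast at h; omega)]
        rw [h1, h2, show e + (t.countP (pvIsH player) + 1) = e + 1 + t.countP (pvIsH player) by omega]

theorem pv_dirtyNoFire (player : String) (k : Int) (hk : 1 ≤ k) :
    ∀ (l : List String) (c e : Nat) (s : Int), (c : Int) + e + l.length ≤ k →
      (∃ v ∈ l, pvIsO player v = true) →
      (l.foldl (pvAStep player k) (c, e, s)).2.2 = s := by
  intro l
  induction l with
  | nil => intro c e s _ hex; rcases hex with ⟨v, hv, _⟩; simp at hv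
  | cons v t ih =>
    intro c e s h hex
    simp only [List.length_cons] at h
    simp only [List.foldl_cons]
    by_cases hO : pvIsO player v = true
    · rw [pv_stepO player k hk _ v hO]
      exact pv_noFire player k t 0 0 s (by push_cast; push_cast at h; omega)
    · have hrun : pvRunCell player v = true := by
        rcases Bool.eq_false_or_eq_true (pvRunCell player v) with ht | hf
        · exact ht
        · exact absurd (pv_notRun_isO player v hf) hO
      have hext : ∃ w ∈ t, pvIsO player w = true := by
        rcases hex with ⟨w, hw, hwO⟩
        rcases List.mem_cons.mp hw with rfl | hwt
        · exact absurd hwO hO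
        · exact ⟨w, hwt, hwO⟩
      have htne : t ≠ [] := by
        rcases hext with ⟨w, hw, _⟩; exact List.ne_nil_of_mem hw
      have hlen : 1 ≤ t.length := by
        cases t with | nil => exact absurd rfl htne | cons _ _ => simp
      rcases pv_runCases player v hrun with hp | ⟨hp, hh⟩
      · rw [pv_stepP player k c e s v hp, if_neg (by push_cast; push_cast at h; omega)]
        exact ih (c + 1) e s (by push_cast; push_cast at h; omega) hext
      · rw [pv_stepH player k c e s v hp hh, if_neg (by push_cast; push_cast at h; omega)]
        exact ih c (e + 1) s (by push_cast; push_cast at h; omega) hext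

theorem pv_cleanPH (player : String) (l : List String)
    (h : ∀ v ∈ l, pvRunCell player v = true) :
    l.countP (pvIsP player) + l.countP (pvIsH player) = l.length := by
  induction l with
  | nil => simp
  | cons v t ih =>
    have ht := ih (fun w hw => h w (List.mem_cons_of_mem v hw))
    rcases pv_runCases player v (h v (List.mem_cons_self)) with hp | ⟨hp, hh⟩
    · simp [List.countP_cons, pvIsP, pvIsH, hp]
      omega
    · simp [List.countP_cons, pvIsP, pvIsH, hp, hh]
      omega

theorem pv_clean_of_countO (player : String) (l : List String)
    (h0 : l.countP (pvIsO player) = 0) : ∀ v ∈ l, pvRunCell player v = true := by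
  intro v hv
  rcases Bool.eq_false_or_eq_true (pvRunCell player v) with ht | hf
  · exact ht
  · exact absurd (List.countP_eq_zero.mp h0 v hv) (by simp [pv_notRun_isO player v hf])

theorem pv_windowEq (player : String) (k : Int) (hk : 1 ≤ k) (l : List String) (s : Int)
    (hl : (l.length : Int) = k) :
    (l.foldl (pvAStep player k) (0, 0, s)).2.2 = s + pvWinVal player k l := by
  by_cases h0 : l.countP (pvIsO player) = 0
  · have hcl := pv_clean_of_countO player l h0
    have hne : l ≠ [] := by
      cases l with
      | nil => simp at hl; omega
      | cons _ _ => simp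
    rw [pv_cleanExact player k l 0 0 s hcl hne (by push_cast; push_cast at hl; omega)]
    have hPH := pv_cleanPH player l hcl
    have hiff : (0 + l.countP (pvIsH player) = 1) ↔ (k - (l.countP (pvIsP player) : Int) = 1) := by
      constructor <;> intro <;> [skip; skip] <;> omega
    unfold pvWinVal
    rw [if_pos h0, if_congr hiff rfl rfl]
    simp only [Nat.zero_add]
    ring
  · have hex : ∃ v ∈ l, pvIsO player v = true :=
      List.countP_pos_iff.mp (Nat.pos_of_ne_zero h0)
    rw [pv_dirtyNoFire player k hk l 0 0 s (by push_cast; omega) hex]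
    unfold pvWinVal
    rw [if_neg h0]
    ring

def pvRunVal (player : String) (k : Int) (run : List String) : Int :=
  if k ≤ (run.length : Int) then
    10 ^ ((run.take k.toNat).count player)
      + (if k - (((run.take k.toNat).count player : Nat) : Int) = 1 then (1 : Int) else 0)
  else 0

theorem pv_countP_isP (player : String) (l : List String) :
    l.count player = l.countP (pvIsP player) := by
  rw [List.count_eq_countP]; rfl

theorem pv_runBlock (player : String) (k : Int) (hk : 1 ≤ k) (run : List String)
    (hclean : ∀ w ∈ run, pvRunCell player w = true) (s : Int) :
    run.foldl (pvAStep player k) (0, 0, s)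
      = (run.countP (pvIsP player), run.countP (pvIsH player), s + pvRunVal player k run) := by
  by_cases hkle : k ≤ (run.length : Int)
  · have hK : (k.toNat : Int) = k := Int.toNat_of_nonneg (by omega)
    have hKlen : k.toNat ≤ run.length := by omega
    have hw12 : run.take k.toNat ++ run.drop k.toNat = run := List.take_append_drop _ _
    have hw1len : (run.take k.toNat).length = k.toNat := by
      rw [List.length_take]; omega
    have hw1ne : run.take k.toNat ≠ [] := by
      have h1 : 0 < (run.take k.toNat).length := by omega
      exact List.ne_nil_of_length_pos h1
    have hw1clean : ∀ w ∈ run.take k.toNat, pvRunCell player w = true :=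
      fun w hw => hclean w (List.mem_of_mem_take hw)
    have hw2clean : ∀ w ∈ run.drop k.toNat, pvRunCell player w = true :=
      fun w hw => hclean w (List.mem_of_mem_drop hw)
    have hPH1 := pv_cleanPH player (run.take k.toNat) hw1clean
    have hfold : run.foldl (pvAStep player k) ((0 : Nat), (0 : Nat), s)
        = (run.drop k.toNat).foldl (pvAStep player k)
            ((run.take k.toNat).foldl (pvAStep player k) ((0 : Nat), (0 : Nat), s)) := by
      conv_lhs => rw [← hw12]
      rw [List.foldl_append]
    rw [hfold,
      pv_cleanExact player k (run.take k.toNat) 0 0 s hw1clean hw1ne (by push_cast; omega),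
      pv_cleanGe player k (run.drop k.toNat) _ _ _ hw2clean (by push_cast; omega)]
    have hcp : run.countP (pvIsP player)
        = (run.take k.toNat).countP (pvIsP player) + (run.drop k.toNat).countP (pvIsP player) := by
      conv_lhs => rw [← hw12]
      rw [List.countP_append]
    have hch : run.countP (pvIsH player)
        = (run.take k.toNat).countP (pvIsH player) + (run.drop k.toNat).countP (pvIsH player) := by
      conv_lhs => rw [← hw12]
      rw [List.countP_append]
    refine Prod.ext ?_ (Prod.ext ?_ ?_)
    · simp only; omega
    · simp only; omega
    · simp only
      unfold pvRunVal
      rw [if_pos hkle, pv_countP_isP player (run.take k.toNat)]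
      have hiff : (0 + (run.take k.toNat).countP (pvIsH player) = 1)
          ↔ (k - ((run.take k.toNat).countP (pvIsP player) : Int) = 1) := by
        constructor <;> intro <;> omega
      rw [if_congr hiff rfl rfl]
      simp only [Nat.zero_add]
      ring
  · rw [pv_cleanLt player k run 0 0 s hclean (by push_cast; omega)]
    unfold pvRunVal
    rw [if_neg hkle]
    simp

theorem pv_dropWhile_head_false (p : String → Bool) :
    ∀ (l : List String) (w : String) (rest' : List String),
      l.dropWhile p = w :: rest' → p w = false := by
  intro l
  induction l with
  | nil => intro w r h; simp at h
  | cons a t ih =>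
    intro w r h
    by_cases hp : p a = true
    · simp only [List.dropWhile_cons, hp, if_true] at h
      exact ih w r h
    · have hpf : p a = false := by simpa using hp
      simp only [List.dropWhile_cons, hpf, Bool.false_eq_true, if_false] at h
      obtain ⟨rfl, -⟩ := List.cons.inj h
      exact hpf

theorem pv_lineEq (player : String) (k : Int) (hk : 1 ≤ k) :
    ∀ (N : Nat) (l : List String), l.length ≤ N → ∀ s : Int,
      (l.foldl (pvAStep player k) (0, 0, s)).2.2 = s + pvLineScore player k l := by
  intro N
  induction N with
  | zero =>
    intro l hl s
    have h0 : l = [] := List.length_eq_zero_iff.mp (Nat.le_zero.mp hl)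
    subst h0
    simp [pvLineScore]
  | succ N ih =>
    intro l hl s
    cases l with
    | nil => simp [pvLineScore]
    | cons v t =>
      simp only [List.length_cons] at hl
      by_cases hrun : pvRunCell player v = true
      · have hsplit : List.takeWhile (pvRunCell player) (v :: t)
            ++ List.dropWhile (pvRunCell player) (v :: t) = v :: t :=
          List.takeWhile_append_dropWhile
        have hclean : ∀ w ∈ List.takeWhile (pvRunCell player) (v :: t), pvRunCell player w = true :=
          fun w hw => List.mem_takeWhile_imp hw
        have hrne : List.takeWhile (pvRunCell player) (v :: t) ≠ [] := by
          rw [List.takeWhile_cons_of_pos hrun]; simp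
        have hrlen : 1 ≤ (List.takeWhile (pvRunCell player) (v :: t)).length := by
          cases h : List.takeWhile (pvRunCell player) (v :: t) with
          | nil => exact absurd h hrne
          | cons _ _ => simp
        have hlen_split : (List.takeWhile (pvRunCell player) (v :: t)).length
            + (List.dropWhile (pvRunCell player) (v :: t)).length = t.length + 1 := by
          have h := congrArg List.length hsplit
          rw [List.length_append] at h
          simp only [List.length_cons] at h
          exact h
        have hfold : (v :: t).foldl (pvAStep player k) ((0 : Nat), (0 : Nat), s)
            = (List.dropWhile (pvRunCell player) (v :: t)).foldl (pvAStep player k)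
                ((List.takeWhile (pvRunCell player) (v :: t)).foldl (pvAStep player k)
                  ((0 : Nat), (0 : Nat), s)) := by
          conv_lhs => rw [← hsplit]
          rw [List.foldl_append]
        have hval : (if k ≤ ((List.takeWhile (pvRunCell player) (v :: t)).length : Int) then
              10 ^ (((List.takeWhile (pvRunCell player) (v :: t)).take k.toNat).count player)
                + (if k - ((((List.takeWhile (pvRunCell player) (v :: t)).take k.toNat).count player : Nat) : Int) = 1
                    then (1 : Int) else 0)
            else 0) = pvRunVal player k (List.takeWhile (pvRunCell player) (v :: t)) := by
          unfold pvRunVal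
          rfl
        rw [hfold, pv_runBlock player k hk _ hclean s, pvLineScore]
        rw [if_pos hrun]
        cases hrest : List.dropWhile (pvRunCell player) (v :: t) with
        | nil =>
          simp only [hrest, List.foldl_nil, pvLineScore, hval]
          ring
        | cons w rest' =>
          have hw0 : pvRunCell player w = false :=
            pv_dropWhile_head_false (pvRunCell player) (v :: t) w rest' hrest
          have hrest'len : rest'.length ≤ N := by
            have h := congrArg List.length hrest
            simp only [List.length_cons] at h
            omega
          simp only [List.foldl_cons]
          rw [pv_stepO player k hk _ w (pv_notRun_isO player w hw0),
            ih rest' hrest'len _, hval]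
          rw [pvLineScore]
          rw [if_neg (by simp [hw0])]
          ring
      · have hO := pv_notRun_isO player v (by simpa using hrun)
        simp only [List.foldl_cons]
        rw [pv_stepO player k hk _ v hO, ih t (by omega) s, pvLineScore]
        rw [if_neg hrun]

theorem pv_rowsChar (pind : String → Bool) (n : Nat) (grid : List (List String)) :
    ∀ (i j : Nat), j ≤ n → (pvPRows pind n grid i).getD j 0 = pvEmath pind grid i j := by
  intro i
  induction i with
  | zero =>
    intro j hj
    have h0 : (List.replicate (n + 1) (0 : Int)).getD j 0 = 0 := by
      cases Nat.lt_or_ge j (n + 1) with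
      | inl h => rw [List.getD_eq_getElem _ _ (by simpa using h)]; simp
      | inr h => rw [List.getD_eq_default _ _ (by simpa using h)]
    rw [show pvPRows pind n grid 0 = List.replicate (n + 1) (0 : Int) from rfl, h0]
    cases j <;> rfl
  | succ i ih =>
    intro j hj
    cases j with
    | zero => simp [pvPRows, pvPStep, pvEmath]
    | succ j =>
      have hjn : j < n := by omega
      show (pvPStep pind n (grid.getD i []) (pvPRows pind n grid i)).getD (j + 1) 0
          = pvEmath pind grid (i + 1) (j + 1)
      unfold pvPStep
      rw [List.getD_cons_succ, PySem.List.getD_map_range _ _ _ _ hjn,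
        ih j (by omega)]
      rfl

theorem pv_telescope (pind : String → Bool) (grid : List (List String)) (i j : Nat) :
    ∀ K : Nat, pvEmath pind grid (i + K) (j + K)
      = pvEmath pind grid i j
        + ((List.range K).map (fun x => if pind ((grid.getD (i+x) []).getD (j+x) "") then (1:Int) else 0)).sum := by
  intro K
  induction K with
  | zero => simp
  | succ K ihK =>
    rw [List.range_succ, List.map_append, List.sum_append,
      show i + (K + 1) = (i + K) + 1 by omega, show j + (K + 1) = (j + K) + 1 by omega]
    show pvEmath pind grid (i + K) (j + K)
        + (if pind ((grid.getD (i + K) []).getD (j + K) "") then (1 : Int) else 0) = _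
    rw [ihK]
    simp only [List.map_cons, List.map_nil, List.sum_cons, List.sum_nil]
    ring

theorem pv_sum_reflect (f : Nat → Int) (m : Nat) :
    ((List.range m).map f).sum = ((List.range m).map (fun j => f (m - 1 - j))).sum := by
  conv_lhs => rw [← List.sum_reverse, ← List.map_reverse, List.range_eq_range',
    List.reverse_range']
  simp [List.map_map, Function.comp_def]

theorem pv_diagScoresEq (player : String) (k : Int) (hk : 1 ≤ k) (n : Nat)
    (grid : List (List String)) :
    pvDiagScores player k n grid
      = (List.range (((n : Int) - k + 1).toNat)).foldl (fun s i =>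
          (List.range (((n : Int) - k + 1).toNat)).foldl (fun s j =>
            s + pvWinVal player k
              ((List.range k.toNat).map (fun x => (grid.getD (i + x) []).getD (j + x) ""))) s) 0 := by
  simp only [pvDiagScores]
  apply PySem.List.foldl_congr_mem'
  intro i hi s
  apply PySem.List.foldl_congr_mem'
  intro j hj s'
  have hi' := List.mem_range.mp hi
  have hj' := List.mem_range.mp hj
  have hK : (k.toNat : Int) = k := Int.toNat_of_nonneg (by omega)
  have hOc := pv_rowsChar (pvIsO player) n grid
  have hPc := pv_rowsChar (pvIsP player) n grid
  have hjn : j + k.toNat ≤ n := by omega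
  have hT := fun pind => pv_telescope pind grid i j k.toNat
  have hcount : ∀ pind : String → Bool,
      ((List.range k.toNat).map (fun x => if pind ((grid.getD (i+x) []).getD (j+x) "") then (1:Int) else 0)).sum
        = (((List.range k.toNat).map (fun x => (grid.getD (i + x) []).getD (j + x) "")).countP pind : Int) := by
    intro pind
    rw [← PySem.List.sum_map_ite_one_zero pind, List.map_map]
    rfl
  have hO : pvEmath (pvIsO player) grid (i + k.toNat) (j + k.toNat) - pvEmath (pvIsO player) grid i j
      = (((List.range k.toNat).map (fun x => (grid.getD (i + x) []).getD (j + x) "")).countP (pvIsO player) : Int) := by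
    rw [hT (pvIsO player), hcount (pvIsO player)]; ring
  have hP : pvEmath (pvIsP player) grid (i + k.toNat) (j + k.toNat) - pvEmath (pvIsP player) grid i j
      = (((List.range k.toNat).map (fun x => (grid.getD (i + x) []).getD (j + x) "")).countP (pvIsP player) : Int) := by
    rw [hT (pvIsP player), hcount (pvIsP player)]; ring
  rw [hOc (i + k.toNat) (j + k.toNat) hjn, hOc i j (by omega),
    hPc (i + k.toNat) (j + k.toNat) hjn, hPc i j (by omega)]
  by_cases h0 : ((List.range k.toNat).map (fun x => (grid.getD (i + x) []).getD (j + x) "")).countP (pvIsO player) = 0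
  · rw [if_pos (by omega)]
    unfold pvWinVal
    rw [if_pos h0]
    have hc : (pvEmath (pvIsP player) grid (i + k.toNat) (j + k.toNat) - pvEmath (pvIsP player) grid i j).toNat
        = ((List.range k.toNat).map (fun x => (grid.getD (i + x) []).getD (j + x) "")).countP (pvIsP player) := by
      omega
    rw [hc, hP]
    ring
  · rw [if_neg (by omega)]
    unfold pvWinVal
    rw [if_neg h0]
    ring

def pvW1 (board : List (List String)) (player : String) (k : Int) (i j : Nat) : Int :=
  pvWinVal player k ((List.range k.toNat).map (fun x => pvCell board (i + x) (j + x)))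

def pvW2 (board : List (List String)) (player : String) (k : Int) (i j : Nat) : Int :=
  pvWinVal player k ((List.range k.toNat).map (fun x => pvCell board (i + x) (((j : Int) + k - 1 - (x : Nat)).toNat)))

-- when k exceeds the board size, A's row/column scans never reach count+empty = k and the
-- diagonal loops are empty, so A returns 0 (= B's early-out)
theorem pv_Azero (board : List (List String)) (k : Int) (player : String)
    (hkn : (board.length : Int) < k) :
    estimate_score board k player = 0 := by
  simp only [estimate_score]
  have hm : ((board.length : Int) - k + 1).toNat = 0 := by omega
  rw [hm]
  simp only [List.range_zero, List.foldl_nil]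
  have hrow0 : ∀ s0 : Int, (List.range board.length).foldl (fun s r => ((List.range board.length).foldl (fun st c => pvAStep player k st (pvCell board r c)) (0, 0, s)).2.2) s0 = s0 := by
    intro s0
    rw [PySem.List.foldl_congr_mem' _ _ (fun s _ => s) _ (by
      intro r _ s
      rw [← List.foldl_map (f := pvCell board r) (g := pvAStep player k)]
      exact pv_noFire player k _ 0 0 s
        (by simp only [List.length_map, List.length_range]; push_cast; omega))]
    exact List.foldl_fixed _
  have hcol0 : ∀ s0 : Int, (List.range board.length).foldl (fun s c => ((List.range board.length).foldl (fun st r => pvAStep player k st (pvCell board r c)) (0, 0, s)).2.2) s0 = s0 := by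
    intro s0
    rw [PySem.List.foldl_congr_mem' _ _ (fun s _ => s) _ (by
      intro c _ s
      rw [← List.foldl_map (f := fun r => pvCell board r c) (g := pvAStep player k)]
      exact pv_noFire player k _ 0 0 s
        (by simp only [List.length_map, List.length_range]; push_cast; omega))]
    exact List.foldl_fixed _
  rw [hrow0, hcol0]

-- hrows is what keeps the Python A from raising IndexError; the ports are total, so the
-- equality proof itself does not consume it.
theorem pv_main (board : List (List String)) (k : Int) (player : String)
    (hk : 1 ≤ k) (hrows : ∀ row ∈ board, board.length ≤ row.length) :
    estimate_score board k player = estimate_score_alt board k player := by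
  clear hrows
  have hK : (k.toNat : Int) = k := Int.toNat_of_nonneg (by omega)
  by_cases hkn : (board.length : Int) < k
  · rw [pv_Azero board k player hkn]
    simp only [estimate_score_alt]
    rw [if_pos hkn]
  simp only [estimate_score, estimate_score_alt]
  rw [if_neg hkn]
  -- row scans agree
  have hrow : List.foldl (fun s r => (List.foldl (fun st c => pvAStep player k st (pvCell board r c)) (0, 0, s) (List.range board.length)).2.2) 0 (List.range board.length)
      = List.foldl (fun s r => s + pvLineScore player k ((List.map (fun i => List.map (fun j => pvCell board i j) (List.range board.length)) (List.range board.length)).getD r [])) 0 (List.range board.length) := by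
    apply PySem.List.foldl_congr_mem'
    intro r hr s
    rw [← List.foldl_map (f := pvCell board r) (g := pvAStep player k),
      pv_lineEq player k hk ((List.range board.length).map (pvCell board r)).length _ le_rfl s,
      PySem.List.getD_map_range _ _ _ _ (List.mem_range.mp hr)]
  -- column scans agree
  have hcol : ∀ s0 : Int, List.foldl (fun s c => (List.foldl (fun st r => pvAStep player k st (pvCell board r c)) (0, 0, s) (List.range board.length)).2.2) s0 (List.range board.length)
      = List.foldl (fun s c => s + pvLineScore player k (List.map (fun r => ((List.map (fun i => List.map (fun j => pvCell board i j) (List.range board.length)) (List.range board.length)).getD r []).getD c "") (List.range board.length))) s0 (List.range board.length) := by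
    intro s0
    apply PySem.List.foldl_congr_mem'
    intro c hc s
    rw [← List.foldl_map (f := fun r => pvCell board r c) (g := pvAStep player k),
      pv_lineEq player k hk ((List.range board.length).map (fun r => pvCell board r c)).length _ le_rfl s]
    have hl : List.map (fun r => ((List.map (fun i => List.map (fun j => pvCell board i j) (List.range board.length)) (List.range board.length)).getD r []).getD c "") (List.range board.length)
        = List.map (fun r => pvCell board r c) (List.range board.length) := by
      apply List.map_congr_left
      intro r hr
      rw [PySem.List.getD_map_range _ _ _ _ (List.mem_range.mp hr),
        PySem.List.getD_map_range _ _ _ _ (List.mem_range.mp hc)]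
    rw [hl]
  -- diagonal scans agree
  have hdiag : ∀ s0 : Int, List.foldl (fun s i => List.foldl (fun s (j : Nat) => (List.foldl (fun st x => pvAStep player k st (pvCell board (i + x) (((j : Int) + k - 1 - (x : Nat)).toNat))) (0, 0, (List.foldl (fun st x => pvAStep player k st (pvCell board (i + x) (j + x))) (0, 0, s) (List.range k.toNat)).2.2) (List.range k.toNat)).2.2) s (List.range (↑board.length - k + 1).toNat)) s0 (List.range (↑board.length - k + 1).toNat)
      = s0 + pvDiagScores player k board.length (List.map (fun i => List.map (fun j => pvCell board i j) (List.range board.length)) (List.range board.length))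
          + pvDiagScores player k board.length (List.map (fun i => List.map (fun j => pvCell board i (board.length - 1 - j)) (List.range board.length)) (List.range board.length)) := by
    intro s0
    have hmK : ∀ i, i ∈ List.range ((↑board.length - k + 1).toNat) → ∀ x, x ∈ List.range k.toNat → i + x < board.length := by
      intro i hi x hx
      have hi' := List.mem_range.mp hi
      have hx' := List.mem_range.mp hx
      omega
    -- A's two window rescans for fixed (i, j) become pvW1 + pvW2
    have ha : List.foldl (fun s i => List.foldl (fun s (j : Nat) => (List.foldl (fun st x => pvAStep player k st (pvCell board (i + x) (((j : Int) + k - 1 - (x : Nat)).toNat))) (0, 0, (List.foldl (fun st x => pvAStep player k st (pvCell board (i + x) (j + x))) (0, 0, s) (List.range k.toNat)).2.2) (List.range k.toNat)).2.2) s (List.range (↑board.length - k + 1).toNat)) s0 (List.range (↑board.length - k + 1).toNat)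
        = List.foldl (fun s i => List.foldl (fun s j => s + (pvW1 board player k i j + pvW2 board player k i j)) s (List.range (↑board.length - k + 1).toNat)) s0 (List.range (↑board.length - k + 1).toNat) := by
      apply PySem.List.foldl_congr_mem'
      intro i _ s1
      apply PySem.List.foldl_congr_mem'
      intro j _ s2
      rw [← List.foldl_map (f := fun x => pvCell board (i + x) (j + x)) (g := pvAStep player k),
        ← List.foldl_map (f := fun x => pvCell board (i + x) ((↑j + k - 1 - ↑x).toNat)) (g := pvAStep player k),
        pv_windowEq player k hk _ _ (by simp [hK]),
        pv_windowEq player k hk _ _ (by simp [hK])]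
      unfold pvW1 pvW2
      ring
    rw [ha]
    -- turn the nested folds into sums
    have hb : List.foldl (fun s i => List.foldl (fun s j => s + (pvW1 board player k i j + pvW2 board player k i j)) s (List.range (↑board.length - k + 1).toNat)) s0 (List.range (↑board.length - k + 1).toNat)
        = s0 + ((List.range (↑board.length - k + 1).toNat).map (fun i => ((List.range (↑board.length - k + 1).toNat).map (fun j => pvW1 board player k i j)).sum + ((List.range (↑board.length - k + 1).toNat).map (fun j => pvW2 board player k i j)).sum)).sum := by
      rw [PySem.List.foldl_congr_mem' _ _ (fun s i => s + (((List.range (↑board.length - k + 1).toNat).map (fun j => pvW1 board player k i j)).sum + ((List.range (↑board.length - k + 1).toNat).map (fun j => pvW2 board player k i j)).sum)) _ (by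
        intro i _ s
        rw [PySem.List.foldl_add, PySem.List.sum_map_add_int]),
        PySem.List.foldl_add]
    rw [hb]
    -- B's grid diagonal pass
    have hg : pvDiagScores player k board.length (List.map (fun i => List.map (fun j => pvCell board i j) (List.range board.length)) (List.range board.length))
        = ((List.range (↑board.length - k + 1).toNat).map (fun i => ((List.range (↑board.length - k + 1).toNat).map (fun j => pvW1 board player k i j)).sum)).sum := by
      rw [pv_diagScoresEq player k hk board.length _,
        PySem.List.foldl_congr_mem' _ _ (fun s i => s + ((List.range (↑board.length - k + 1).toNat).map (fun j => pvW1 board player k i j)).sum) _ (by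
          intro i hi s
          rw [PySem.List.foldl_congr_mem' _ _ (fun s j => s + pvW1 board player k i j) _ (by
            intro j hj s'
            have hwin : (List.range k.toNat).map (fun x => ((List.map (fun i => List.map (fun j => pvCell board i j) (List.range board.length)) (List.range board.length)).getD (i + x) []).getD (j + x) "")
                = (List.range k.toNat).map (fun x => pvCell board (i + x) (j + x)) := by
              apply List.map_congr_left
              intro x hx
              rw [PySem.List.getD_map_range _ _ _ _ (hmK i hi x hx),
                PySem.List.getD_map_range _ _ _ _ (hmK j hj x hx)]
            rw [hwin]
            rfl),
            PySem.List.foldl_add]),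
        PySem.List.foldl_add]
      ring
    -- B's flipped-grid diagonal pass equals A's anti-diagonal windows
    have hf : pvDiagScores player k board.length (List.map (fun i => List.map (fun j => pvCell board i (board.length - 1 - j)) (List.range board.length)) (List.range board.length))
        = ((List.range (↑board.length - k + 1).toNat).map (fun i => ((List.range (↑board.length - k + 1).toNat).map (fun j => pvW2 board player k i j)).sum)).sum := by
      rw [pv_diagScoresEq player k hk board.length _,
        PySem.List.foldl_congr_mem' _ _ (fun s i => s + ((List.range (↑board.length - k + 1).toNat).map (fun j => pvWinVal player k ((List.range k.toNat).map (fun x => pvCell board (i + x) (board.length - 1 - (j + x)))))).sum) _ (by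
          intro i hi s
          rw [PySem.List.foldl_congr_mem' _ _ (fun s j => s + pvWinVal player k ((List.range k.toNat).map (fun x => pvCell board (i + x) (board.length - 1 - (j + x))))) _ (by
            intro j hj s'
            have hwin : (List.range k.toNat).map (fun x => ((List.map (fun i => List.map (fun j => pvCell board i (board.length - 1 - j)) (List.range board.length)) (List.range board.length)).getD (i + x) []).getD (j + x) "")
                = (List.range k.toNat).map (fun x => pvCell board (i + x) (board.length - 1 - (j + x))) := by
              apply List.map_congr_left
              intro x hx
              rw [PySem.List.getD_map_range _ _ _ _ (hmK i hi x hx),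
                PySem.List.getD_map_range _ _ _ _ (hmK j hj x hx)]
            rw [hwin]),
            PySem.List.foldl_add]),
        PySem.List.foldl_add]
      have hrefl : ∀ i, i ∈ List.range ((↑board.length - k + 1).toNat) → ((List.range (↑board.length - k + 1).toNat).map (fun j => pvWinVal player k ((List.range k.toNat).map (fun x => pvCell board (i + x) (board.length - 1 - (j + x)))))).sum = ((List.range (↑board.length - k + 1).toNat).map (fun j => pvW2 board player k i j)).sum := by
        intro i _
        rw [pv_sum_reflect (fun j => pvW2 board player k i j) ((↑board.length - k + 1).toNat)]
        apply congrArg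
        apply List.map_congr_left
        intro j hj
        unfold pvW2
        apply congrArg
        apply List.map_congr_left
        intro x hx
        have hj' := List.mem_range.mp hj
        have hx' := List.mem_range.mp hx
        have hcol : board.length - 1 - (j + x) = (((((↑board.length - k + 1).toNat - 1 - j) : Nat) : Int) + k - 1 - (x : Nat)).toNat := by
          omega
        rw [hcol]
      rw [List.map_congr_left hrefl]
      ring
    rw [hg, hf, PySem.List.sum_map_add_int (List.range (↑board.length - k + 1).toNat)
      (fun i => ((List.range (↑board.length - k + 1).toNat).map (fun j => pvW1 board player k i j)).sum)
      (fun i => ((List.range (↑board.length - k + 1).toNat).map (fun j => pvW2 board player k i j)).sum)]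
    ring
  rw [hdiag, hrow, hcol]

-- ===== VERDICT (by name: the statement is the Claim_ definition above) =====
theorem estimate_score_spec : Claim_equal_estimate_score := by
  unfold Claim_equal_estimate_score
  intro board k player _ hpre
  unfold Spec_estimate_score
  exact pv_main board k player hpre.1 hpre.2
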